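-- pv_equiv track=rewrite | github.com/y-f-li/AI-Movie-Recommender | src/modules/title_canonicalizer.py | build_canonical_phrase_to_titles
-- ===== SOURCE A (Python) =====
-- from typing import Dict, Iterable, List
--
-- def build_canonical_phrase_to_titles(canonical_title_to_qids: Dict[str, List[str]], max_span_len: int = 5) -> Dict[str, List[str]]:
--     if max_span_len < 1:
--         raise ValueError("max_span_len must be at least 1")
--
--     phrase_map: Dict[str, List[str]] = {}
--     for canonical_title in canonical_title_to_qids.keys():
--         tokens = canonical_title.split()
--         if not tokens:
--             continue
--         n = len(tokens)
--         for start in range(n):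
--             max_len_here = min(max_span_len, n - start)
--             for span_len in range(1, max_len_here + 1):
--                 phrase = " ".join(tokens[start:start + span_len])
--                 if not phrase:
--                     continue
--                 bucket = phrase_map.setdefault(phrase, [])
--                 if canonical_title not in bucket:
--                     bucket.append(canonical_title)
--
--     for phrase in phrase_map:
--         phrase_map[phrase].sort()
--     return phrase_map
-- ===== SOURCE B (Python) =====
-- def _distinct_phrases(title, max_span_len):
--     tokens = title.split()
--     n = len(tokens)
--     spans = [" ".join(tokens[i:i + l])
--              for i in range(n)
--              for l in range(1, min(max_span_len, n - i) + 1)]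
--     return list(dict.fromkeys(spans))
--
--
-- def build_canonical_phrase_to_titles(canonical_title_to_qids, max_span_len=5):
--     if max_span_len < 1:
--         raise ValueError("max_span_len must be at least 1")
--
--     titles = list(canonical_title_to_qids.keys())
--
--     # pass 1: register every phrase in first-occurrence order, with an empty bucket
--     phrase_map = {}
--     for title in titles:
--         for phrase in _distinct_phrases(title, max_span_len):
--             phrase_map.setdefault(phrase, [])
--
--     # pass 2: visit titles in sorted order, so every bucket is built already sorted
--     # (titles are dict keys, hence unique; phrases of one title are distinct, so
--     # each title is appended to a bucket at most once — no membership test, no sort)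
--     for title in sorted(titles):
--         for phrase in _distinct_phrases(title, max_span_len):
--             phrase_map[phrase].append(title)
--
--     return phrase_map
-- ===== Notes on version B (the rewrite author's own statement) =====
-- stated objective: alternative
-- what changed: B makes two passes instead of one: pass 1 registers each title's distinct phrases (deduplicated per title) with empty buckets, and pass 2 visits titles in sorted order appending each title once per phrase, so A's per-phrase 'title not in bucket' linear scan and the final per-bucket .sort() pass both disappear.
import Mathlib
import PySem

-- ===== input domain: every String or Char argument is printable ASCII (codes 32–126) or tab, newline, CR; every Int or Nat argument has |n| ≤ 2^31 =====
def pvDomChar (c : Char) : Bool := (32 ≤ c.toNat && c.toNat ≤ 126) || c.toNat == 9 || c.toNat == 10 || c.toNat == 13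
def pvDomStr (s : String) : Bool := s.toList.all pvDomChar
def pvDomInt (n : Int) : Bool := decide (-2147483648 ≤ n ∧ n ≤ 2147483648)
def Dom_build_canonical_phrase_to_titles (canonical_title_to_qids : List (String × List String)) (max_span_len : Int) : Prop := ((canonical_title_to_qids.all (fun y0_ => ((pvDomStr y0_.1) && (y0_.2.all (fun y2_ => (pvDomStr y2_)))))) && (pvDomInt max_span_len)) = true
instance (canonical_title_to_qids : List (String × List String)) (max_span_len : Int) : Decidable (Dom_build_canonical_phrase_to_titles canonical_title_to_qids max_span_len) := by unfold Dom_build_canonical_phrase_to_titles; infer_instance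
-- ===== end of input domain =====

-- B replaces A's single pass (with a 'title not in bucket' scan per phrase and a final
-- per-bucket sort pass) by two passes: phrase registration in first-occurrence order,
-- then appending titles in sorted order so buckets come out sorted; same return value on Pre_.

-- ===== PORT A =====
-- the dict argument is represented by its items list; '.keys()' iterates the distinct
-- keys in first-occurrence order, i.e. PySem.Set.ofList of the first components
def build_canonical_phrase_to_titles (canonical_title_to_qids : List (String × List String)) (max_span_len : Int) : List (String × List String) :=
  if max_span_len < 1 then []   -- Python raises ValueError here; excluded by Pre_
  else
    let phrase_map := (PySem.Set.ofList (canonical_title_to_qids.map (·.1))).foldl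
      (fun pm canonical_title =>
        let tokens := PySem.Str.split₀ canonical_title
        if tokens = [] then pm
        else
          let n : Int := tokens.length
          (PySem.List.pyRange 0 n 1).foldl (fun pm start =>
            let max_len_here := min max_span_len (n - start)
            (PySem.List.pyRange 1 (max_len_here + 1) 1).foldl (fun pm span_len =>
              let phrase := PySem.Str.join " " (PySem.List.slice tokens (some start) (some (start + span_len)))
              if phrase = "" then pm
              else
                -- setdefault + conditional append, expressed by re-inserting the bucket
                let bucket := pm.getD phrase []
                if canonical_title ∈ bucket then pm.insert phrase bucket
                else pm.insert phrase (bucket ++ [canonical_title])) pm) pm)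
      PySem.Dict.empty
    -- final pass: sort every bucket in place; the dict is returned as its items
    phrase_map.items.map (fun pb => (pb.1, PySem.List.sorted pb.2 (fun x => x) false))

-- ===== PORT B =====
-- _distinct_phrases: the comprehension over (i, l), then list(dict.fromkeys(...))
def pvAltPhrases (title : String) (max_span_len : Int) : List String :=
  let tokens := PySem.Str.split₀ title
  let n : Int := tokens.length
  PySem.List.dedup ((PySem.List.pyRange 0 n 1).flatMap (fun i =>
    (PySem.List.pyRange 1 (min max_span_len (n - i) + 1) 1).map (fun l =>
      PySem.Str.join " " (PySem.List.slice tokens (some i) (some (i + l))))))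

def build_canonical_phrase_to_titles_alt (canonical_title_to_qids : List (String × List String)) (max_span_len : Int) : List (String × List String) :=
  if max_span_len < 1 then []   -- Python raises ValueError here; excluded by Pre_
  else
    let titles := PySem.Set.ofList (canonical_title_to_qids.map (·.1))
    -- pass 1: register phrases with empty buckets
    let pm1 := titles.foldl (fun pm title =>
      (pvAltPhrases title max_span_len).foldl (fun pm phrase => pm.setdefault phrase []) pm)
      PySem.Dict.empty
    -- pass 2: append each title to its phrases' buckets, titles in sorted order
    -- (phrase_map[phrase].append(title): the key is always present after pass 1,
    --  so Dict.modify with default [] is exact here)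
    let pm2 := (PySem.List.sorted titles (fun x => x) false).foldl (fun pm title =>
      (pvAltPhrases title max_span_len).foldl (fun pm phrase => pm.modify phrase [] (fun b => b ++ [title])) pm)
      pm1
    pm2.items

-- ===== PRECONDITION & SPEC =====
-- A raises ValueError iff max_span_len < 1; that is all Pre_ excludes
def Pre_build_canonical_phrase_to_titles (canonical_title_to_qids : List (String × List String)) (max_span_len : Int) : Prop := 1 ≤ max_span_len
instance (canonical_title_to_qids : List (String × List String)) (max_span_len : Int) : Decidable (Pre_build_canonical_phrase_to_titles canonical_title_to_qids max_span_len) := by unfold Pre_build_canonical_phrase_to_titles; infer_instance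

def pvWitness_build_canonical_phrase_to_titles : (List (String × List String)) × Int := ([("star wars", ["Q1"]), ("star", ["Q2"])], 2)

def Spec_build_canonical_phrase_to_titles (canonical_title_to_qids : List (String × List String)) (max_span_len : Int) (out : List (String × List String)) : Prop := out = build_canonical_phrase_to_titles_alt canonical_title_to_qids max_span_len
instance (canonical_title_to_qids : List (String × List String)) (max_span_len : Int) (out : List (String × List String)) : Decidable (Spec_build_canonical_phrase_to_titles canonical_title_to_qids max_span_len out) := by unfold Spec_build_canonical_phrase_to_titles; infer_instance

-- ===== CLAIM (what is proved, stated in full; the proofs are below) =====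
def Claim_equal_build_canonical_phrase_to_titles : Prop := ∀ (canonical_title_to_qids : List (String × List String)) (max_span_len : Int), Dom_build_canonical_phrase_to_titles canonical_title_to_qids max_span_len → Pre_build_canonical_phrase_to_titles canonical_title_to_qids max_span_len → Spec_build_canonical_phrase_to_titles canonical_title_to_qids max_span_len (build_canonical_phrase_to_titles canonical_title_to_qids max_span_len)

-- ===== LEMMAS AND PROOFS =====

-- the flat (with duplicates, in A's enumeration order) list of phrases of one title
def pvSpans (title : String) (max_span_len : Int) : List String :=
  let tokens := PySem.Str.split₀ title
  let n : Int := tokens.length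
  (PySem.List.pyRange 0 n 1).flatMap (fun i =>
    (PySem.List.pyRange 1 (min max_span_len (n - i) + 1) 1).map (fun l =>
      PySem.Str.join " " (PySem.List.slice tokens (some i) (some (i + l)))))

theorem pvAltPhrases_eq_dedup (t : String) (m : Int) :
    pvAltPhrases t m = PySem.List.dedup (pvSpans t m) := rfl

-- ---- tokens of split() are nonempty words ----
theorem pv_split₀_go_ne_nil (s : List Char) : ∀ (cur : List Char) (acc : List (List Char)),
    (∀ w ∈ acc, w ≠ []) → ∀ w ∈ PySem.Chars.split₀.go s cur acc, w ≠ [] := by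
  induction s with
  | nil =>
    intro cur acc hacc w hw
    unfold PySem.Chars.split₀.go at hw
    by_cases hc : cur.isEmpty
    · simp [hc] at hw; exact hacc w hw
    · simp [hc] at hw
      rcases hw with hw | hw
      · exact hacc w hw
      · subst hw; simp [List.isEmpty_iff] at hc; simp [hc]
  | cons c rest ih =>
    intro cur acc hacc w hw
    unfold PySem.Chars.split₀.go at hw
    by_cases hsp : PySem.Chars.isspace c
    · by_cases hc : cur.isEmpty
      · simp [hsp, hc] at hw; exact ih [] acc hacc w hw
      · simp [hsp, hc] at hw
        refine ih [] (cur.reverse :: acc) ?_ w hw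
        intro v hv
        rcases List.mem_cons.mp hv with hv | hv
        · subst hv; simp [List.isEmpty_iff] at hc; simp [hc]
        · exact hacc v hv
    · simp [hsp] at hw; exact ih (c :: cur) acc hacc w hw

theorem pv_split₀_ne_empty (s : String) : ∀ w ∈ PySem.Str.split₀ s, w ≠ "" := by
  intro w hw heq
  have h : w.toList ∈ (PySem.Str.split₀ s).map String.toList := List.mem_map_of_mem hw
  rw [PySem.Str.split₀_map_toList] at h
  have := pv_split₀_go_ne_nil s.toList [] [] (by simp) w.toList h
  apply this
  rw [heq]; rfl

theorem pv_join_ne_empty (w : String) (rest : List String) (hw : w ≠ "") :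
    PySem.Str.join " " (w :: rest) ≠ "" := by
  intro h
  have h2 : (PySem.Str.join " " (w :: rest)).toList = [] := by rw [h]; rfl
  rw [PySem.Str.toList_join] at h2
  cases rest with
  | nil =>
    simp only [List.map] at h2
    rw [PySem.Chars.join_singleton] at h2
    exact hw (by have := congrArg String.ofList h2; simpa using this)
  | cons b bs =>
    simp only [List.map] at h2
    rw [PySem.Chars.join_cons_cons] at h2
    simp at h2

-- ---- every phrase of a title is a nonempty string ----
theorem pv_mem_spans_ne_empty (t : String) (m : Int) : ∀ p ∈ pvSpans t m, p ≠ "" := by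
  intro p hp
  simp only [pvSpans, List.mem_flatMap, List.mem_map] at hp
  obtain ⟨i, hi, l, hl, hp⟩ := hp
  rw [PySem.List.mem_pyRange_one] at hi hl
  subst hp
  have h0i : 0 ≤ i := hi.1
  have h0l : 0 ≤ i + l := by omega
  rw [PySem.List.slice_toNat _ h0i h0l]
  have hlen : i.toNat < (PySem.Str.split₀ t).length := by
    have := hi.2; omega
  have htake : 1 ≤ (i + l).toNat - i.toNat := by omega
  obtain ⟨w, ws, hws⟩ : ∃ w ws, List.take ((i + l).toNat - i.toNat) (List.drop i.toNat (PySem.Str.split₀ t)) = w :: ws := by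
    have hlen2 : 0 < (List.take ((i + l).toNat - i.toNat) (List.drop i.toNat (PySem.Str.split₀ t))).length := by
      rw [List.length_take, List.length_drop]; omega
    cases h : List.take ((i + l).toNat - i.toNat) (List.drop i.toNat (PySem.Str.split₀ t)) with
    | nil => rw [h] at hlen2; simp at hlen2
    | cons w ws => exact ⟨w, ws, rfl⟩
  rw [hws]
  apply pv_join_ne_empty
  apply pv_split₀_ne_empty t
  have : w ∈ List.take ((i + l).toNat - i.toNat) (List.drop i.toNat (PySem.Str.split₀ t)) := by simp [hws]
  exact List.mem_of_mem_drop (List.mem_of_mem_take this)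

theorem pv_spans_nil_of_tokens_nil (t : String) (m : Int) (h : PySem.Str.split₀ t = []) :
    pvSpans t m = [] := by
  simp [pvSpans, h, PySem.List.pyRange_one_eq_nil]

-- ---- A's per-phrase step, and the flattened inner double loop ----
def pvStepA (t : String) (pm : PySem.Dict String (List String)) (p : String) : PySem.Dict String (List String) :=
  let bucket := pm.getD p []
  if t ∈ bucket then pm.insert p bucket else pm.insert p (bucket ++ [t])

theorem pv_inner_flatten (t : String) (m : Int) (pm : PySem.Dict String (List String)) :
    (PySem.List.pyRange 0 ((PySem.Str.split₀ t).length : Int) 1).foldl (fun pm start =>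
      let max_len_here := min m (((PySem.Str.split₀ t).length : Int) - start)
      (PySem.List.pyRange 1 (max_len_here + 1) 1).foldl (fun pm span_len =>
        let phrase := PySem.Str.join " " (PySem.List.slice (PySem.Str.split₀ t) (some start) (some (start + span_len)))
        if phrase = "" then pm
        else
          let bucket := pm.getD phrase []
          if t ∈ bucket then pm.insert phrase bucket
          else pm.insert phrase (bucket ++ [t])) pm) pm
    = (pvSpans t m).foldl (pvStepA t) pm := by
  rw [pvSpans, List.foldl_flatMap]
  apply PySem.List.foldl_congr_mem
  intro pm2 i hi
  rw [List.foldl_map]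
  apply PySem.List.foldl_congr_mem
  intro pm3 l hl
  have hne : PySem.Str.join " " (PySem.List.slice (PySem.Str.split₀ t) (some i) (some (i + l))) ≠ "" := by
    apply pv_mem_spans_ne_empty t m
    rw [pvSpans]
    simp only [List.mem_flatMap, List.mem_map]
    exact ⟨i, hi, ⟨l, hl, rfl⟩⟩
  simp only [pvStepA, if_neg hne]

theorem pv_foldA_getD (t : String) (l : List String) (pm : PySem.Dict String (List String)) (q : String) :
    (l.foldl (pvStepA t) pm).getD q []
    = if q ∈ l ∧ t ∉ pm.getD q [] then pm.getD q [] ++ [t] else pm.getD q [] := by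
  induction l generalizing pm with
  | nil => simp
  | cons p l ih =>
    simp only [List.foldl_cons]
    rw [ih]
    have hstep : ∀ q', (pvStepA t pm p).getD q' []
        = if q' = p ∧ t ∉ pm.getD q' [] then pm.getD q' [] ++ [t] else pm.getD q' [] := by
      intro q'
      simp only [pvStepA]
      by_cases ht : t ∈ pm.getD p []
      · rw [if_pos ht, PySem.Dict.getD_insert]
        by_cases hq : q' = p
        · subst hq; simp [ht]
        · simp [hq]
      · rw [if_neg ht, PySem.Dict.getD_insert]
        by_cases hq : q' = p
        · subst hq; simp [ht]
        · simp [hq]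
    rw [hstep q]
    by_cases hq : q = p
    · subst hq
      by_cases ht : t ∈ pm.getD q []
      · simp [ht]
      · simp [ht]
    · simp only [hq, false_and, if_false]
      by_cases hql : q ∈ l <;> simp [hq, hql]

theorem pv_foldA_keys (t : String) (l : List String) (pm : PySem.Dict String (List String)) :
    (l.foldl (pvStepA t) pm).keys = PySem.Set.update pm.keys l := by
  have h : (pvStepA t) = fun pm p => pm.insert p
      (let b := pm.getD p []; if t ∈ b then b else b ++ [t]) := by
    funext pm p
    simp only [pvStepA]
    by_cases ht : t ∈ pm.getD p [] <;> simp [ht]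
  rw [h, PySem.Dict.keys_foldl_insert]

-- ---- Set helpers ----
theorem pv_update_foldl_add {α : Type} [BEq α] [LawfulBEq α] (m : List α) (s K : PySem.Set α) :
    PySem.Set.update K (m.foldl PySem.Set.add s) = m.foldl PySem.Set.add (PySem.Set.update K s) := by
  induction m generalizing s with
  | nil => rfl
  | cons x m ih =>
    simp only [List.foldl_cons]
    rw [ih]
    congr 1
    by_cases hx : x ∈ s
    · rw [PySem.Set.add_of_mem hx, PySem.Set.add_of_mem]
      simp [PySem.Set.mem_update, hx]
    · rw [PySem.Set.add_of_not_mem hx]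
      show List.foldl PySem.Set.add K (s ++ [x]) = _
      rw [List.foldl_append]
      rfl

theorem pv_update_dedup {α : Type} [BEq α] [LawfulBEq α] (K : PySem.Set α) (m : List α) :
    PySem.Set.update K (PySem.List.dedup m) = PySem.Set.update K m := by
  rw [PySem.List.dedup_eq_ofList, PySem.Set.ofList_eq_foldl]
  rw [show PySem.Set.update K (m.foldl PySem.Set.add []) = _ from pv_update_foldl_add m [] K]
  rfl

theorem pv_ofList_append {α : Type} [BEq α] (a b : List α) :
    PySem.Set.ofList (a ++ b) = PySem.Set.update (PySem.Set.ofList a) b := by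
  rw [PySem.Set.ofList_eq_foldl, List.foldl_append, PySem.Set.ofList_eq_foldl]
  rfl

theorem pv_update_of_subset {α : Type} [BEq α] [LawfulBEq α] (s : PySem.Set α) (l : List α)
    (h : ∀ x ∈ l, x ∈ s) : PySem.Set.update s l = s := by
  induction l generalizing s with
  | nil => rfl
  | cons x l ih =>
    show List.foldl PySem.Set.add s (x :: l) = s
    simp only [List.foldl_cons]
    rw [PySem.Set.add_of_mem (h x (by simp))]
    exact ih s (fun y hy => h y (by simp [hy]))

-- ---- A's outer loop characterised ----
def pvALoop (ts : List String) (m : Int) : PySem.Dict String (List String) :=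
  ts.foldl (fun pm t => if PySem.Str.split₀ t = [] then pm
    else (pvSpans t m).foldl (pvStepA t) pm) PySem.Dict.empty

theorem pvALoop_spec (ts : List String) (m : Int) (hnd : ts.Nodup) :
    (pvALoop ts m).keys = PySem.Set.ofList (ts.flatMap (fun t => pvSpans t m)) ∧
    ∀ q, (pvALoop ts m).getD q [] = ts.filter (fun t => decide (q ∈ pvSpans t m)) := by
  induction ts using List.reverseRecOn with
  | nil => exact ⟨rfl, fun q => rfl⟩
  | append_singleton ts t ih =>
    have hnd' : ts.Nodup := (List.nodup_append.mp hnd).1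
    have hT : t ∉ ts := by
      have h3 := (List.nodup_append.mp hnd).2.2
      intro hmem; exact h3 t hmem t (by simp) rfl
    obtain ⟨ihk, ihg⟩ := ih hnd'
    have hfold : pvALoop (ts ++ [t]) m
        = (if PySem.Str.split₀ t = [] then pvALoop ts m
           else (pvSpans t m).foldl (pvStepA t) (pvALoop ts m)) := by
      simp [pvALoop, List.foldl_append]
    have hspans_fold : pvALoop (ts ++ [t]) m = (pvSpans t m).foldl (pvStepA t) (pvALoop ts m) := by
      rw [hfold]
      by_cases htok : PySem.Str.split₀ t = []
      · rw [if_pos htok, pv_spans_nil_of_tokens_nil t m htok]; rfl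
      · rw [if_neg htok]
    constructor
    · rw [hspans_fold, pv_foldA_keys, ihk, List.flatMap_append]
      rw [pv_ofList_append]
      simp
    · intro q
      rw [hspans_fold, pv_foldA_getD, ihg q]
      have ht_not : t ∉ ts.filter (fun t => decide (q ∈ pvSpans t m)) := by
        intro h; exact hT (List.mem_of_mem_filter h)
      rw [List.filter_append]
      by_cases hq : q ∈ pvSpans t m
      · rw [if_pos ⟨hq, ht_not⟩]; simp [hq]
      · rw [if_neg (by simp [hq])]; simp [hq]

-- ---- B pass 1 characterised ----
theorem pv_fold_setdefault (l : List String) (pm : PySem.Dict String (List String)) :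
    (l.foldl (fun pm p => pm.setdefault p []) pm).keys = PySem.Set.update pm.keys l ∧
    ∀ q, (l.foldl (fun pm p => pm.setdefault p []) pm).getD q [] = pm.getD q [] := by
  induction l generalizing pm with
  | nil => exact ⟨rfl, fun q => rfl⟩
  | cons p l ih =>
    simp only [List.foldl_cons]
    obtain ⟨ihk, ihg⟩ := ih (pm.setdefault p [])
    constructor
    · rw [ihk, PySem.Dict.keys_setdefault]
      have hu : PySem.Set.update pm.keys (p :: l) = PySem.Set.update (PySem.Set.add pm.keys p) l := rfl
      rw [hu]
      congr 1
      by_cases hc : pm.contains p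
      · rw [if_pos hc, PySem.Set.add_of_mem ((PySem.Dict.contains_iff_mem_keys pm p).mp hc)]
      · rw [if_neg hc, PySem.Set.add_of_not_mem]
        intro hmem
        exact hc ((PySem.Dict.contains_iff_mem_keys pm p).mpr hmem)
    · intro q
      rw [ihg q]
      by_cases hc : pm.contains p
      · rw [PySem.Dict.setdefault_of_contains pm _ hc]
      · rw [PySem.Dict.setdefault_of_not_contains pm _ (by simpa using hc)]
        rw [PySem.Dict.getD_insert]
        by_cases hq : q = p
        · subst hq; rw [if_pos rfl, PySem.Dict.getD_of_not_contains pm _ (by simpa using hc)]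
        · rw [if_neg hq]

-- ---- B pass 2: the pairs list, filtered per bucket ----
theorem pv_pairs_filter (L : List String) (P : String → List String) (q : String)
    (hnd : ∀ t, (P t).Nodup) :
    ((L.flatMap (fun t => (P t).map (fun p => (p, t)))).filter (fun x => x.1 == q)).map (·.2)
    = L.filter (fun t => decide (q ∈ P t)) := by
  induction L with
  | nil => rfl
  | cons t L ih =>
    simp only [List.flatMap_cons, List.filter_append, List.map_append, ih, List.filter_cons]
    have hone : ∀ (ps : List String), ps.Nodup →
        (((ps.map (fun p => (p, t))).filter (fun x => x.1 == q)).map (·.2))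
        = if q ∈ ps then [t] else [] := by
      intro ps hps
      induction ps with
      | nil => simp
      | cons p ps ihp =>
        simp only [List.map_cons, List.filter_cons]
        by_cases hpq : p = q
        · subst hpq
          have hnp : p ∉ ps := (List.nodup_cons.mp hps).1
          rw [if_pos (by simp)]
          simp only [List.map_cons]
          have h2 : ((ps.map (fun p => (p, t))).filter (fun x => x.1 == p)).map (·.2) = [] := by
            rw [ihp (List.nodup_cons.mp hps).2] at *
            · simp [hnp]
          simp [h2, hnp]
        · rw [if_neg (by simp [hpq])]
          rw [ihp (List.nodup_cons.mp hps).2]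
          simp only [List.mem_cons]
          rw [if_congr (or_iff_right (fun h => hpq h.symm)) rfl rfl]
    rw [hone (P t) (hnd t)]
    by_cases hq : q ∈ P t <;> simp [hq]

-- ---- sorted/filter exchange ----
theorem pv_sorted_filter (ts : List String) (p : String → Bool) (hnd : ts.Nodup) :
    PySem.List.sorted (ts.filter p) (fun x => x) false
    = (PySem.List.sorted ts (fun x => x) false).filter p := by
  apply PySem.List.sorted_eq_of_perm_of_pairwise_lt
  · exact (PySem.List.sorted_perm ts (fun x => x) false).filter p
  · have h1 : (PySem.List.sorted ts (fun x => x) false).Pairwise (fun a b => a ≤ b) :=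
      PySem.List.sorted_pairwise ts (fun x => x)
    have h2 : (PySem.List.sorted ts (fun x => x) false).Nodup :=
      ((PySem.List.sorted_perm ts (fun x => x) false).nodup_iff).mpr hnd
    have h3 : (PySem.List.sorted ts (fun x => x) false).Pairwise (fun a b => a < b) := by
      refine (h1.and h2).imp ?_
      rintro a b ⟨hle, hne⟩
      exact lt_of_le_of_ne hle hne
    exact h3.filter p
-- ---- keys agree: dedup inside flatMap is invisible to ofList ----
theorem pv_keys_PS (ts : List String) (m : Int) :
    PySem.Set.ofList (ts.flatMap (fun t => pvAltPhrases t m))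
    = PySem.Set.ofList (ts.flatMap (fun t => pvSpans t m)) := by
  induction ts using List.reverseRecOn with
  | nil => rfl
  | append_singleton ts t ih =>
    rw [List.flatMap_append, List.flatMap_append, pv_ofList_append, pv_ofList_append, ih]
    simp only [List.flatMap_cons, List.flatMap_nil, List.append_nil]
    rw [pvAltPhrases_eq_dedup, pv_update_dedup]

-- ===== VERDICT (by name: the statement is the Claim_ definition above) =====
set_option maxHeartbeats 2000000 in
theorem build_canonical_phrase_to_titles_spec : Claim_equal_build_canonical_phrase_to_titles := by
  intro l m hdom hpre
  unfold Spec_build_canonical_phrase_to_titles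
  have hm : ¬ (m < 1) := by
    unfold Pre_build_canonical_phrase_to_titles at hpre; omega
  unfold build_canonical_phrase_to_titles build_canonical_phrase_to_titles_alt
  rw [if_neg hm, if_neg hm]
  set ts := PySem.Set.ofList (l.map (·.1)) with hts
  have hndts : ts.Nodup := PySem.Set.nodup_ofList _
  -- A side: the outer fold is pvALoop
  have hA : (ts.foldl
      (fun pm canonical_title =>
        let tokens := PySem.Str.split₀ canonical_title
        if tokens = [] then pm
        else
          let n : Int := tokens.length
          (PySem.List.pyRange 0 n 1).foldl (fun pm start =>
            let max_len_here := min m (n - start)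
            (PySem.List.pyRange 1 (max_len_here + 1) 1).foldl (fun pm span_len =>
              let phrase := PySem.Str.join " " (PySem.List.slice tokens (some start) (some (start + span_len)))
              if phrase = "" then pm
              else
                let bucket := pm.getD phrase []
                if canonical_title ∈ bucket then pm.insert phrase bucket
                else pm.insert phrase (bucket ++ [canonical_title])) pm) pm)
      PySem.Dict.empty) = pvALoop ts m := by
    unfold pvALoop
    congr 1
    funext pm t
    by_cases htok : PySem.Str.split₀ t = []
    · simp only [htok, if_true]
    · simp only [htok, if_false]
      exact pv_inner_flatten t m pm
  simp only []
  rw [hA]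
  -- B side: flatten pass 1
  rw [show (ts.foldl (fun pm title =>
        (pvAltPhrases title m).foldl (fun pm phrase => pm.setdefault phrase []) pm)
        PySem.Dict.empty)
      = ((ts.flatMap (fun t => pvAltPhrases t m)).foldl (fun pm p => pm.setdefault p []) PySem.Dict.empty)
    from (List.foldl_flatMap).symm]
  set pm1 := ((ts.flatMap (fun t => pvAltPhrases t m)).foldl (fun pm p => pm.setdefault p []) PySem.Dict.empty) with hpm1
  -- B side: flatten pass 2 into a fold over (phrase, title) pairs
  have hinner : ∀ (pm : PySem.Dict String (List String)) (t : String),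
      (pvAltPhrases t m).foldl (fun pm phrase => pm.modify phrase [] (fun b => b ++ [t])) pm
      = ((pvAltPhrases t m).map (fun p => (p, t))).foldl
          (fun pm x => pm.modify x.1 [] (fun b => b ++ [x.2])) pm := by
    intro pm t
    rw [List.foldl_map]
  rw [show ((PySem.List.sorted ts (fun x => x) false).foldl (fun pm title =>
        (pvAltPhrases title m).foldl (fun pm phrase => pm.modify phrase [] (fun b => b ++ [title])) pm) pm1)
      = (((PySem.List.sorted ts (fun x => x) false).flatMap (fun t => (pvAltPhrases t m).map (fun p => (p, t)))).foldl
          (fun pm x => pm.modify x.1 [] (fun b => b ++ [x.2])) pm1) from by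
    rw [List.foldl_flatMap]
    apply PySem.List.foldl_congr_mem
    intro pm t _
    exact hinner pm t]
  set pairs := ((PySem.List.sorted ts (fun x => x) false).flatMap (fun t => (pvAltPhrases t m).map (fun p => (p, t)))) with hpairs
  obtain ⟨hkA, hgA⟩ := pvALoop_spec ts m hndts
  have hndPS : ∀ t, (pvAltPhrases t m).Nodup := fun t => by
    rw [pvAltPhrases_eq_dedup]; exact PySem.List.nodup_dedup _
  have hkeys1 : pm1.keys = PySem.Set.ofList (ts.flatMap (fun t => pvAltPhrases t m)) := by
    rw [hpm1, (pv_fold_setdefault _ _).1, PySem.Dict.keys_empty, PySem.Set.ofList_eq_foldl]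
    rfl
  have hg1 : ∀ q, pm1.getD q [] = [] := fun q => by
    rw [hpm1, (pv_fold_setdefault _ _).2, PySem.Dict.getD_empty]
  have hkeysEq : pm1.keys = (pvALoop ts m).keys := by rw [hkeys1, pv_keys_PS, hkA]
  have hkB : (pairs.foldl (fun pm x => pm.modify x.1 [] (fun b => b ++ [x.2])) pm1).keys = pm1.keys := by
    rw [PySem.Dict.keys_foldl_modify_key pairs (fun x => x.1) [] (fun _ x => fun b => b ++ [x.2]) pm1]
    apply pv_update_of_subset
    intro x hx
    simp only [List.mem_map] at hx
    obtain ⟨pr, hpr, hxpr⟩ := hx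
    rw [hpairs] at hpr
    simp only [List.mem_flatMap, List.mem_map] at hpr
    obtain ⟨t, ht, p, hp, hppr⟩ := hpr
    have htts : t ∈ ts := (PySem.List.mem_sorted ts (fun x => x) false t).mp ht
    rw [hkeys1]
    rw [PySem.Set.mem_ofList]
    simp only [List.mem_flatMap]
    exact ⟨t, htts, by rw [← hxpr, ← hppr]; exact hp⟩
  have hgB : ∀ q, (pairs.foldl (fun pm x => pm.modify x.1 [] (fun b => b ++ [x.2])) pm1).getD q []
      = (PySem.List.sorted ts (fun x => x) false).filter (fun t => decide (q ∈ pvAltPhrases t m)) := by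
    intro q
    rw [PySem.Dict.getD_foldl_modify_append pairs pm1 q, hg1 q, hpairs,
      pv_pairs_filter _ _ _ hndPS]
    simp
  have hndkA : (pvALoop ts m).keys.Nodup := by rw [hkA]; exact PySem.Set.nodup_ofList _
  have hndkB : (pairs.foldl (fun pm x => pm.modify x.1 [] (fun b => b ++ [x.2])) pm1).keys.Nodup := by
    rw [hkB, hkeysEq]; exact hndkA
  rw [PySem.Dict.items_eq_map_keys _ hndkA [], PySem.Dict.items_eq_map_keys _ hndkB []]
  rw [hkB, hkeysEq, List.map_map]
  apply List.map_congr_left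
  intro q hq
  simp only [Function.comp]
  rw [hgA q, hgB q]
  have hfil : ts.filter (fun t => decide (q ∈ pvSpans t m)) = ts.filter (fun t => decide (q ∈ pvAltPhrases t m)) := by
    apply List.filter_congr
    intro t _
    rw [decide_eq_decide, pvAltPhrases_eq_dedup]
    exact (PySem.List.mem_dedup _ _).symm
  rw [hfil, pv_sorted_filter ts _ hndts]
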